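-- pv_equiv track=rewrite | github.com/aajjbb/advent-of-code | 2020/day07/sol2.py | count_child
-- ===== SOURCE A (Python) =====
-- def count_child(graph, node, count):
--     if not node in graph:
--         return 0
--
--     bag_count = 0
--
--     for next_node, next_count in graph[node]:
--         child_result = count_child(graph, next_node, next_count)
--
--         bag_count += next_count * (child_result + 1)
--
--     return bag_count
-- ===== SOURCE B (Python) =====
-- def count_child(graph, node, count):
--     # Memoized DP over the bag DAG: each bag's total is computed once and cached.
--     memo = {}
--
--     def total(n):
--         if n in memo:
--             return memo[n]
--         if n not in graph:
--             return 0
--         t = 0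
--         for child, qty in graph[n]:
--             t += qty * (total(child) + 1)
--         memo[n] = t
--         return t
--
--     return total(node)
-- ===== Notes on version B (the rewrite author's own statement) =====
-- stated objective: alternative
-- what changed: B memoizes the per-bag total in a dict (DP over the DAG), so each bag is expanded once and looked up afterwards, instead of A's plain recursion that re-expands a bag once per path to it.
-- outside the precondition, e.g. on count_child({'x': [('x', 1)]}, 'y', 0): A returns 0, B returns 0
import Mathlib
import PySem

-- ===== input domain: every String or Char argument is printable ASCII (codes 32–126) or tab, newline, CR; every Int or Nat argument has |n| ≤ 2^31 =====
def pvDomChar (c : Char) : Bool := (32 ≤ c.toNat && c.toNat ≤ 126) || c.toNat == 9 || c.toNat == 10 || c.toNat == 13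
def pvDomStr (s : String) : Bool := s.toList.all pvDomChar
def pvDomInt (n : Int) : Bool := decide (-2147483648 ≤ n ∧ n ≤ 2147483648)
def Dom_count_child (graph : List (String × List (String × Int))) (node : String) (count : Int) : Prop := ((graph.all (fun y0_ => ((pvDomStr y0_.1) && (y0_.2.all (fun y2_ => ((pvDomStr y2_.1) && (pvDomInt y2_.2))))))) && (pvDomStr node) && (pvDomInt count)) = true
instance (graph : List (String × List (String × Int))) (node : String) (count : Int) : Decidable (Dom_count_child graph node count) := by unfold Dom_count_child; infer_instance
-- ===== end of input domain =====

-- B memoizes per-bag totals (DP over the DAG) instead of A's plain recursion, which re-expands a shared bag once per path; return value only.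

-- ===== PORT A =====
-- first-match association-list lookup = Python dict lookup under the stated convention
def lookupFirst (g : List (String × List (String × Int))) (n : String) : Option (List (String × Int)) :=
  (g.find? (fun p => p.1 == n)).map Prod.snd

-- fueled literal transliteration of A's recursion (fuel is only a termination device;
-- under Pre_ the fuel graph.length+1 is never exhausted)
def countA (g : List (String × List (String × Int))) : Nat → String → Int → Int
  | 0, _, _ => 0
  | f+1, node, _count =>
    match lookupFirst g node with
    | none => 0
    | some children =>
      children.foldl (fun bc p => bc + p.2 * (countA g f p.1 p.2 + 1)) 0

def count_child (graph : List (String × List (String × Int))) (node : String) (count : Int) : Int :=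
  countA graph (graph.length + 1) node count

-- ===== PORT B =====
-- fueled literal transliteration of B's memoized recursion: state = (value, memo)
def countB (g : List (String × List (String × Int))) : Nat → PySem.Dict String Int → String → Int × PySem.Dict String Int
  | 0, memo, _ => (0, memo)
  | f+1, memo, n =>
    match memo.get? n with
    | some v => (v, memo)
    | none =>
      match lookupFirst g n with
      | none => (0, memo)
      | some children =>
        let res := children.foldl (fun st p =>
          let r := countB g f st.2 p.1
          (st.1 + p.2 * (r.1 + 1), r.2)) (0, memo)
        (res.1, res.2.insert n res.1)

def count_child_alt (graph : List (String × List (String × Int))) (node : String) (count : Int) : Int :=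
  (countB graph (graph.length + 1) PySem.Dict.empty node).1

-- ===== PRECONDITION & SPEC =====
-- key-children of a node (edge targets in the bag graph)
def succsOf (g : List (String × List (String × Int))) (n : String) : List String :=
  ((lookupFirst g n).getD []).map Prod.fst

def readyKey (g : List (String × List (String × Int))) (rem : List String) (k : String) : Bool :=
  (succsOf g k).all (fun m => !(rem.contains m))

-- Kahn-style peeling: repeatedly output a key all of whose children are already out
def topo (g : List (String × List (String × Int))) : Nat → List String → List String
  | 0, _ => []
  | f+1, rem =>
    match rem.find? (readyKey g rem) with
    | none => []
    | some k => k :: topo g f (rem.erase k)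

def topoOrder (g : List (String × List (String × Int))) : List String :=
  topo g g.length (g.map Prod.fst)

-- Pre_ excludes cyclic bag graphs, on which Python A's recursion does not terminate.
-- It is slightly narrower than necessary: a cycle unreachable from `node` also violates
-- it although A would still return there (and A and B agree: both return the same value).
def Pre_count_child (graph : List (String × List (String × Int))) (node : String) (count : Int) : Prop :=
  ∀ k ∈ graph.map Prod.fst, k ∈ topoOrder graph

instance (graph : List (String × List (String × Int))) (node : String) (count : Int) : Decidable (Pre_count_child graph node count) := by unfold Pre_count_child; infer_instance

def pvWitness_count_child : (List (String × List (String × Int))) × String × Int :=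
  ([("a", [("b", 2), ("c", 7)]), ("b", [("c", 3)]), ("c", [])], "a", 1)

def Spec_count_child (graph : List (String × List (String × Int))) (node : String) (count : Int) (out : Int) : Prop := out = count_child_alt graph node count
instance (graph : List (String × List (String × Int))) (node : String) (count : Int) (out : Int) : Decidable (Spec_count_child graph node count out) := by unfold Spec_count_child; infer_instance

-- ===== CLAIM (what is proved, stated in full; the proofs are below) =====
def Claim_equal_count_child : Prop := ∀ (graph : List (String × List (String × Int))) (node : String) (count : Int), Dom_count_child graph node count → Pre_count_child graph node count → Spec_count_child graph node count (count_child graph node count)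

-- ===== LEMMAS AND PROOFS =====

-- abbreviation used only in the proofs: the "true" total of a bag (A at full fuel)
def trueVal (g : List (String × List (String × Int))) (n : String) : Int :=
  countA g (g.length + 1) n 0

def memoOK (g : List (String × List (String × Int))) (memo : PySem.Dict String Int) : Prop :=
  ∀ k v, memo.get? k = some v → k ∈ g.map Prod.fst ∧ v = trueVal g k

theorem lookupFirst_eq_none (g : List (String × List (String × Int))) (n : String)
    (h : n ∉ g.map Prod.fst) : lookupFirst g n = none := by
  unfold lookupFirst
  have : g.find? (fun p => p.1 == n) = none := by
    rw [List.find?_eq_none]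
    intro p hp hb
    exact h ((eq_of_beq hb) ▸ List.mem_map_of_mem hp)
  rw [this]; rfl

theorem lookupFirst_isSome (g : List (String × List (String × Int))) (n : String)
    (h : n ∈ g.map Prod.fst) : ∃ L, lookupFirst g n = some L := by
  unfold lookupFirst
  obtain ⟨p, hp, he⟩ := List.mem_map.1 h
  have hs : (g.find? (fun p => p.1 == n)).isSome := by
    apply List.find?_isSome.2
    exact ⟨p, hp, by simp [he]⟩
  obtain ⟨q, hq⟩ := Option.isSome_iff_exists.1 hs
  exact ⟨q.2, by rw [hq]; rfl⟩

theorem countA_nonkey (g : List (String × List (String × Int))) (f : Nat) (n : String) (c : Int)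
    (h : n ∉ g.map Prod.fst) : countA g f n c = 0 := by
  cases f with
  | zero => rfl
  | succ f => simp [countA, lookupFirst_eq_none g n h]

theorem succsOf_eq (g : List (String × List (String × Int))) (n : String)
    (L : List (String × Int)) (h : lookupFirst g n = some L) :
    succsOf g n = L.map Prod.fst := by
  unfold succsOf
  rw [h]
  rfl

theorem topo_length_le (g : List (String × List (String × Int))) :
    ∀ (f : Nat) (rem : List String), (topo g f rem).length ≤ f := by
  intro f
  induction f with
  | zero => intro rem; simp [topo]
  | succ f ih =>
    intro rem
    simp only [topo]
    cases hf : rem.find? (readyKey g rem) with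
    | none => simp
    | some k => simpa using ih (rem.erase k)

theorem topo_decomp (g : List (String × List (String × Int))) :
    ∀ (f : Nat) (rem pre post : List String) (k : String),
      topo g f rem = pre ++ k :: post →
      ∀ m ∈ succsOf g k, m ∉ rem ∨ m ∈ pre := by
  intro f
  induction f with
  | zero => intro rem pre post k h; simp [topo] at h
  | succ f ih =>
    intro rem pre post k h m hm
    simp only [topo] at h
    cases hf : rem.find? (readyKey g rem) with
    | none => rw [hf] at h; simp at h
    | some k0 =>
      rw [hf] at h
      have hready : readyKey g rem k0 = true := List.find?_some hf
      cases pre with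
      | nil =>
        simp only [List.nil_append] at h
        have hk : k0 = k := (List.cons.injEq .. ▸ h).1
        left
        subst hk
        unfold readyKey at hready
        have := (List.all_eq_true.1 hready) m hm
        simpa using this
      | cons p0 pre' =>
        simp only [List.cons_append] at h
        have hk0 : k0 = p0 := (List.cons.injEq .. ▸ h).1
        have htail : topo g f (rem.erase k0) = pre' ++ k :: post := (List.cons.injEq .. ▸ h).2
        rcases ih (rem.erase k0) pre' post k htail m hm with hno | hin
        · by_cases hrem : m ∈ rem
          · right
            have hmk0 : m = k0 := by
              by_contra hne
              exact hno ((List.mem_erase_of_ne hne).2 hrem)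
            simp [hmk0, hk0]
          · left; exact hrem
        · right; right; exact hin

theorem idxOf_lt_of_mem_take (l : List String) :
    ∀ (i : Nat) (m : String), m ∈ l.take i → l.idxOf m < i := by
  induction l with
  | nil => intro i m hm; simp at hm
  | cons x xs ih =>
    intro i m hm
    cases i with
    | zero => simp at hm
    | succ i =>
      by_cases hx : m = x
      · subst hx; simp
      · simp only [List.take_succ_cons, List.mem_cons] at hm
        rcases hm with h | h
        · exact absurd h hx
        · have := ih i m h
          have e : (x::xs).idxOf m = xs.idxOf m + 1 := by simp [Ne.symm hx]
          omega

-- a key child comes strictly earlier in the topological order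
theorem rank_child_lt (g : List (String × List (String × Int)))
    (pre : ∀ k ∈ g.map Prod.fst, k ∈ topoOrder g)
    (n m : String) (hn : n ∈ g.map Prod.fst) (hm : m ∈ g.map Prod.fst)
    (hs : m ∈ succsOf g n) :
    (topoOrder g).idxOf m < (topoOrder g).idxOf n := by
  have hno : n ∈ topoOrder g := pre n hn
  have hlt := List.idxOf_lt_length_of_mem hno
  set l := topoOrder g with hl
  have hdec : l = l.take (l.idxOf n) ++ n :: l.drop (l.idxOf n + 1) := by
    have h3 : l.drop (l.idxOf n) = l[l.idxOf n]'hlt :: l.drop (l.idxOf n + 1) :=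
      (List.getElem_cons_drop ..).symm
    rw [List.getElem_idxOf] at h3
    conv_lhs => rw [← List.take_append_drop (l.idxOf n) l, h3]
  have := topo_decomp g g.length (g.map Prod.fst) (l.take (l.idxOf n)) (l.drop (l.idxOf n + 1)) n (by rw [show topo g g.length (g.map Prod.fst) = l from rfl]; exact hdec) m hs
  rcases this with hno' | hin
  · exact absurd hm hno'
  · exact idxOf_lt_of_mem_take l (l.idxOf n) m hin

theorem rank_lt_len (g : List (String × List (String × Int)))
    (pre : ∀ k ∈ g.map Prod.fst, k ∈ topoOrder g)
    (n : String) (hn : n ∈ g.map Prod.fst) :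
    (topoOrder g).idxOf n < g.length := by
  have h1 := List.idxOf_lt_length_of_mem (pre n hn)
  have h2 := topo_length_le g g.length (g.map Prod.fst)
  simp only [topoOrder] at h1 ⊢
  omega

theorem foldl_sum_congr (h1 h2 : String × Int → Int) :
    ∀ (L : List (String × Int)) (a : Int), (∀ p ∈ L, h1 p = h2 p) →
      L.foldl (fun bc p => bc + h1 p) a = L.foldl (fun bc p => bc + h2 p) a := by
  intro L
  induction L with
  | nil => intro a _; rfl
  | cons p L ih =>
    intro a hL
    simp only [List.foldl_cons]
    rw [hL p (List.mem_cons_self ..)]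
    exact ih _ (fun q hq => hL q (List.mem_cons_of_mem _ hq))

-- A's fueled recursion is fuel- and count-independent once the fuel exceeds the rank
theorem countA_fuel_irrel (g : List (String × List (String × Int)))
    (pre : ∀ k ∈ g.map Prod.fst, k ∈ topoOrder g) :
    ∀ (r : Nat) (n : String) (c1 c2 : Int) (f1 f2 : Nat),
      n ∈ g.map Prod.fst → (topoOrder g).idxOf n = r → r < f1 → r < f2 →
      countA g f1 n c1 = countA g f2 n c2 := by
  intro r
  induction r using Nat.strong_induction_on with
  | _ r ih =>
    intro n c1 c2 f1 f2 hn hr h1 h2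
    obtain ⟨L, hL⟩ := lookupFirst_isSome g n hn
    cases f1 with
    | zero => omega
    | succ f1 =>
      cases f2 with
      | zero => omega
      | succ f2 =>
        simp only [countA, hL]
        apply foldl_sum_congr
        intro p hp
        by_cases hk : p.1 ∈ g.map Prod.fst
        · have hs : p.1 ∈ succsOf g n := by
            rw [succsOf_eq g n L hL]; exact List.mem_map_of_mem hp
          have hlt := rank_child_lt g pre n p.1 hn hk hs
          rw [hr] at hlt
          rw [ih _ hlt p.1 p.2 p.2 f1 f2 hk rfl (by omega) (by omega)]
        · rw [countA_nonkey g f1 _ _ hk, countA_nonkey g f2 _ _ hk]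

theorem countB_nonkey (g : List (String × List (String × Int))) (f : Nat)
    (memo : PySem.Dict String Int) (n : String)
    (h : n ∉ g.map Prod.fst) (hm : memoOK g memo) : countB g f memo n = (0, memo) := by
  cases f with
  | zero => rfl
  | succ f =>
    simp only [countB]
    cases hg : memo.get? n with
    | some v => exact absurd (hm n v hg).1 h
    | none => simp [lookupFirst_eq_none g n h]

theorem memoOK_empty (g : List (String × List (String × Int))) : memoOK g PySem.Dict.empty := by
  intro k v h
  simp [PySem.Dict.get?_empty] at h

theorem memoOK_insert (g : List (String × List (String × Int))) (memo : PySem.Dict String Int)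
    (n : String) (v : Int) (hm : memoOK g memo) (hn : n ∈ g.map Prod.fst)
    (hv : v = trueVal g n) : memoOK g (memo.insert n v) := by
  intro k v h
  rw [PySem.Dict.get?_insert] at h
  split at h
  · rename_i he
    cases h
    exact ⟨he ▸ hn, he ▸ hv⟩
  · exact hm k v h

theorem countB_correct (g : List (String × List (String × Int)))
    (pre : ∀ k ∈ g.map Prod.fst, k ∈ topoOrder g) :
    ∀ (r : Nat) (n : String) (f : Nat) (memo : PySem.Dict String Int),
      memoOK g memo → n ∈ g.map Prod.fst → (topoOrder g).idxOf n = r → r < f →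
      (countB g f memo n).1 = trueVal g n ∧ memoOK g (countB g f memo n).2 := by
  intro r
  induction r using Nat.strong_induction_on with
  | _ r ih =>
    intro n f memo hmemo hn hr hf
    cases f with
    | zero => omega
    | succ f =>
      cases hg : memo.get? n with
      | some v =>
        simp only [countB, hg]
        exact ⟨(hmemo n v hg).2, hmemo⟩
      | none =>
        obtain ⟨L, hL⟩ := lookupFirst_isSome g n hn
        have hsub : ∀ p ∈ L, p.1 ∈ succsOf g n := by
          intro p hp
          rw [succsOf_eq g n L hL]; exact List.mem_map_of_mem hp
        have fold_ok : ∀ (L' : List (String × Int)), (∀ p ∈ L', p.1 ∈ succsOf g n) →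
            ∀ (st : Int × PySem.Dict String Int), memoOK g st.2 →
            (L'.foldl (fun st p =>
              let r := countB g f st.2 p.1
              (st.1 + p.2 * (r.1 + 1), r.2)) st).1 =
              L'.foldl (fun bc p => bc + p.2 * (trueVal g p.1 + 1)) st.1 ∧
            memoOK g (L'.foldl (fun st p =>
              let r := countB g f st.2 p.1
              (st.1 + p.2 * (r.1 + 1), r.2)) st).2 := by
          intro L'
          induction L' with
          | nil => intro _ st hst; exact ⟨rfl, hst⟩
          | cons p L' ihL =>
            intro hsub' st hst
            have hchild : (countB g f st.2 p.1).1 = trueVal g p.1 ∧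
                memoOK g (countB g f st.2 p.1).2 := by
              by_cases hk : p.1 ∈ g.map Prod.fst
              · have hlt := rank_child_lt g pre n p.1 hn hk (hsub' p (List.mem_cons_self ..))
                rw [hr] at hlt
                exact ih _ hlt p.1 f st.2 hst hk rfl (by omega)
              · rw [countB_nonkey g f st.2 p.1 hk hst]
                refine ⟨?_, hst⟩
                show (0 : Int) = trueVal g p.1
                rw [trueVal, countA_nonkey g _ _ _ hk]
            obtain ⟨hv, hmOK⟩ := hchild
            have := ihL (fun q hq => hsub' q (List.mem_cons_of_mem _ hq))
              (st.1 + p.2 * ((countB g f st.2 p.1).1 + 1), (countB g f st.2 p.1).2) hmOK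
            rw [hv] at this
            simp only [List.foldl_cons]
            rw [hv]
            exact this
        have hend := fold_ok L hsub (0, memo) hmemo
        have hA : trueVal g n = L.foldl (fun bc p => bc + p.2 * (trueVal g p.1 + 1)) 0 := by
          show countA g (g.length + 1) n 0 = _
          simp only [countA, hL]
          apply foldl_sum_congr
          intro p hp
          by_cases hk : p.1 ∈ g.map Prod.fst
          · have hlt := rank_lt_len g pre p.1 hk
            rw [countA_fuel_irrel g pre ((topoOrder g).idxOf p.1) p.1 p.2 0 g.length
              (g.length + 1) hk rfl (by omega) (by omega)]
            rfl
          · rw [countA_nonkey g _ _ _ hk, trueVal, countA_nonkey g _ _ _ hk]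
        simp only [countB, hg, hL]
        refine ⟨?_, ?_⟩
        · show (L.foldl (fun st p =>
              let r := countB g f st.2 p.1
              (st.1 + p.2 * (r.1 + 1), r.2)) (0, memo)).1 = trueVal g n
          rw [hend.1, hA]
        · show memoOK g (((L.foldl (fun st p =>
              let r := countB g f st.2 p.1
              (st.1 + p.2 * (r.1 + 1), r.2)) (0, memo)).2).insert n
              ((L.foldl (fun st p =>
              let r := countB g f st.2 p.1
              (st.1 + p.2 * (r.1 + 1), r.2)) (0, memo)).1))
          apply memoOK_insert g _ n _ hend.2 hn
          rw [hend.1, hA]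


-- ===== VERDICT (by name: the statement is the Claim_ definition above) =====
theorem count_child_spec : Claim_equal_count_child := by
  intro g node c _dom pre
  unfold Spec_count_child count_child count_child_alt
  by_cases hk : node ∈ g.map Prod.fst
  · have hr := rank_lt_len g pre node hk
    rw [countB_correct g pre ((topoOrder g).idxOf node) node (g.length+1) PySem.Dict.empty
          (memoOK_empty g) hk rfl (by omega) |>.1]
    exact countA_fuel_irrel g pre ((topoOrder g).idxOf node) node c 0 (g.length+1) (g.length+1)
      hk rfl (by omega) (by omega)
  · rw [countB_nonkey g (g.length+1) PySem.Dict.empty node hk (memoOK_empty g)]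
    exact countA_nonkey g (g.length+1) node c hk
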